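-- pv_equiv track=rewrite | github.com/MikitaTsiarentsyeu/Md-PT-64-23 | Tasks/Ermalitskaia/Ermalitskaia_6_3.py | even_numbers_sum
-- ===== SOURCE A (Python) =====
-- def even_numbers_sum(list1):
--     sum1 = 0
--     try:
--         for i in list1:
--             if isinstance(i, int) == False:
--                 return TypeError("Invalid input type")
--             else:
--                 if i % 2 == 0:
--                     sum1 = sum1 + i
--         return f"The sum of even numbers is {sum1}"
--
--     except TypeError as error1:
--         return error1
-- ===== SOURCE B (Python) =====
-- def even_numbers_sum(list1):
--     # validation pass (short-circuits at first non-int), then a separate sum pass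
--     if not all(isinstance(i, int) for i in list1):
--         return TypeError("Invalid input type")
--     return f"The sum of even numbers is {sum(i for i in list1 if i % 2 == 0)}"
-- ===== Notes on version B (the rewrite author's own statement) =====
-- stated objective: simpler
-- what changed: Replaces the fused loop (per-element type check + conditional accumulator) with two separate passes: an all() validation pass followed by a sum-of-filtered-comprehension, with no mutable accumulator.
import Mathlib
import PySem

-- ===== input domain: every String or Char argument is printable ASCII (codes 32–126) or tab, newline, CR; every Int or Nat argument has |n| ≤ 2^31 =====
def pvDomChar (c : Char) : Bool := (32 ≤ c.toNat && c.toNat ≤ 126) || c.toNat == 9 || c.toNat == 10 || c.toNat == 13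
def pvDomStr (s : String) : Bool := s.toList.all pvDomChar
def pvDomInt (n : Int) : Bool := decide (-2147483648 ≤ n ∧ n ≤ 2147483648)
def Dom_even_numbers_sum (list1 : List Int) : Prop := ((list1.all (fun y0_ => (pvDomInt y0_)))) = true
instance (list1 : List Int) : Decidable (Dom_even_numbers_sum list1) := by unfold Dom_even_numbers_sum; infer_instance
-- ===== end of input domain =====

-- B splits A's fused loop (per-element type check + conditional accumulator) into a
-- validation pass followed by a filter-then-sum pass; same value on every List Int.
-- (On List Int the isinstance check always passes, so neither side takes the TypeError branch.)

-- ===== PORT A =====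
-- A's loop: mutable accumulator sum1, adding i when i % 2 == 0 (isinstance is always true for Int).
def even_numbers_sum (list1 : List Int) : String :=
  let sum1 := list1.foldl (fun sum1 i => if PySem.Int.mod i 2 == 0 then sum1 + i else sum1) 0
  "The sum of even numbers is " ++ PySem.Int.toStr sum1

-- ===== PORT B =====
-- B: validation pass (trivially true on Int), then sum of the filtered list.
def even_numbers_sum_alt (list1 : List Int) : String :=
  if ¬ (list1.all (fun _ => true)) then "Invalid input type"
  else "The sum of even numbers is " ++
    PySem.Int.toStr ((list1.filter (fun i => PySem.Int.mod i 2 == 0)).sum)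

-- ===== PRECONDITION & SPEC =====
def Spec_even_numbers_sum (list1 : List Int) (out : String) : Prop := out = even_numbers_sum_alt list1
instance (list1 : List Int) (out : String) : Decidable (Spec_even_numbers_sum list1 out) := by unfold Spec_even_numbers_sum; infer_instance

-- ===== CLAIM (what is proved, stated in full; the proofs are below) =====
def Claim_equal_even_numbers_sum : Prop := ∀ (list1 : List Int), Dom_even_numbers_sum list1 → Spec_even_numbers_sum list1 (even_numbers_sum list1)

-- ===== LEMMAS AND PROOFS =====
theorem even_numbers_sum_foldl_eq (list1 : List Int) (a : Int) :
    list1.foldl (fun sum1 i => if PySem.Int.mod i 2 == 0 then sum1 + i else sum1) a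
      = a + (list1.filter (fun i => PySem.Int.mod i 2 == 0)).sum := by
  induction list1 generalizing a with
  | nil => simp
  | cons x xs ih =>
    simp only [List.foldl_cons, List.filter_cons]
    by_cases h : (PySem.Int.mod x 2 == 0) = true
    · rw [if_pos h, if_pos h, ih, List.sum_cons]; ring
    · rw [if_neg h, if_neg h, ih]

-- ===== VERDICT (by name: the statement is the Claim_ definition above) =====
theorem even_numbers_sum_spec : Claim_equal_even_numbers_sum := by
  intro list1 _
  unfold Spec_even_numbers_sum even_numbers_sum even_numbers_sum_alt
  rw [even_numbers_sum_foldl_eq]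
  simp
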